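-- pv_equiv track=rewrite | github.com/Yuvv/CSES | introductory-problems/011-coin-piles.py | solve
-- ===== SOURCE A (Python) =====
-- def solve(a: int, b: int) -> bool:
--     ab_sum = a + b
--     if ab_sum % 3 != 0:
--         return False
--
--     while True:
--         if a == b:
--             return True
--         elif a > b:
--             diff = a - b
--             a -= 2 * diff
--             b -= diff
--         else:
--             diff = b - a
--             a -= diff
--             b -= 2 * diff
--         if a == 0 and b == 0:
--             return True
--         elif a <= 0:
--             return False
--         elif b <= 0:
--             return False
--     return True
-- ===== SOURCE B (Python) =====
-- def solve(a: int, b: int) -> bool: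
--     # closed form: the loop collapses both piles to 2*min-max in one step
--     return (a + b) % 3 == 0 and max(a, b) <= 2 * min(a, b)
-- ===== Notes on version B (the rewrite author's own statement) =====
-- stated objective: simpler
-- what changed: Replaces A's mutating while-loop by the closed-form predicate (a+b)%3==0 and max(a,b)<=2*min(a,b), which the loop's single real iteration encodes.
-- intended difference: On a == b < 0 with a divisible by 3 (e.g. (-3,-3)) A returns True via its a==b early exit before any sign check, while B returns False; False is the intended answer since negative equal piles cannot be emptied and the monotone condition max<=2*min correctly rejects them. — e.g. on solve(-3, -3): A returns true, B returns false
import Mathlib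
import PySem

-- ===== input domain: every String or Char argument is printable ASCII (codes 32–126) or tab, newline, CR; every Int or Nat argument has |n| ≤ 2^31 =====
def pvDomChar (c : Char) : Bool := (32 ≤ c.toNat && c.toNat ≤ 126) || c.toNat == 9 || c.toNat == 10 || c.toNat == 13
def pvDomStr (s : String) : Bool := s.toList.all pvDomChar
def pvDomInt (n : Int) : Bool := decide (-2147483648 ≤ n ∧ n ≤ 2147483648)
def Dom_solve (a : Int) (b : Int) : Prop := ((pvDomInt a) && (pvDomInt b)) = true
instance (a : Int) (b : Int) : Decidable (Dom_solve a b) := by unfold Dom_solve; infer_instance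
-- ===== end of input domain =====

-- B replaces A's mutating while-loop with the closed-form predicate it encodes (objective: simpler).

-- ===== PORT A =====
-- The 'while True' loop of A; it recurses only when the updated piles are equal
-- and positive, so the measure 'if a = b then 0 else 1' decreases.
def solveLoop (a : Int) (b : Int) : Bool :=
  if a = b then true
  else if a > b then
    let diff := a - b
    let a' := a - 2 * diff
    let b' := b - diff
    if a' = 0 && b' = 0 then true
    else if a' ≤ 0 then false
    else if b' ≤ 0 then false
    else solveLoop a' b'
  else
    let diff := b - a
    let a' := a - diff
    let b' := b - 2 * diff
    if a' = 0 && b' = 0 then true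
    else if a' ≤ 0 then false
    else if b' ≤ 0 then false
    else solveLoop a' b'
termination_by (if a = b then (0 : Nat) else 1)
decreasing_by
  · have h : a - 2 * (a - b) = b - (a - b) := by ring
    simp only [if_pos h]
    split <;> omega
  · have h : a - (b - a) = b - 2 * (b - a) := by ring
    simp only [if_pos h]
    split <;> omega

def solve (a : Int) (b : Int) : Bool :=
  let ab_sum := a + b
  if PySem.Int.mod ab_sum 3 ≠ 0 then false
  else solveLoop a b

-- ===== PORT B =====
def solve_alt (a : Int) (b : Int) : Bool :=
  PySem.Int.mod (a + b) 3 == 0 && max a b ≤ 2 * min a b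

-- ===== PRECONDITION & SPEC =====
-- On a == b < 0 with a divisible by 3 A's a==b early exit returns True before any
-- sign check; B returns False, the intended answer for piles that cannot be emptied.
def D_solve (a : Int) (b : Int) : Prop := a = b ∧ a < 0 ∧ a % 3 = 0
instance (a : Int) (b : Int) : Decidable (D_solve a b) := by unfold D_solve; infer_instance

def Spec_solve (a : Int) (b : Int) (out : Bool) : Prop := ¬ D_solve a b → out = solve_alt a b
instance (a : Int) (b : Int) (out : Bool) : Decidable (Spec_solve a b out) := by unfold Spec_solve; infer_instance

def pvDiffWitness_solve : Int × Int := (-3, -3)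
def pvDiffWitnessOut_solve : Bool × Bool := (true, false)

-- ===== CLAIM (what is proved, stated in full; the proofs are below) =====
def Claim_unchanged_solve : Prop := ∀ (a : Int) (b : Int), Dom_solve a b → Spec_solve a b (solve a b)
def Claim_changed_solve : Prop := Dom_solve (pvDiffWitness_solve.1) (pvDiffWitness_solve.2) ∧ D_solve (pvDiffWitness_solve.1) (pvDiffWitness_solve.2) ∧ solve (pvDiffWitness_solve.1) (pvDiffWitness_solve.2) = pvDiffWitnessOut_solve.1 ∧ solve_alt (pvDiffWitness_solve.1) (pvDiffWitness_solve.2) = pvDiffWitnessOut_solve.2 ∧ pvDiffWitnessOut_solve.1 ≠ pvDiffWitnessOut_solve.2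
def Claim_exact_solve : Prop := ∀ (a : Int) (b : Int), Dom_solve a b → D_solve a b → solve a b ≠ solve_alt a b

-- ===== LEMMAS AND PROOFS =====
theorem solveLoop_self (a : Int) : solveLoop a a = true := by
  rw [solveLoop]; simp

theorem solveLoop_eq (a b : Int) :
    solveLoop a b = (decide (a = b) || decide (max a b ≤ 2 * min a b)) := by
  rw [solveLoop]
  by_cases hab : a = b
  · simp [hab]
  · by_cases hgt : a > b
    · have h1 : a - 2 * (a - b) = b - (a - b) := by ring
      by_cases hz : a - 2 * (a - b) = 0
      · have h2 : max a b ≤ 2 * min a b := by omega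
        simp [hab, hgt, hz, h2]
        omega
      · by_cases hneg : a - 2 * (a - b) ≤ 0
        · have h2 : ¬ max a b ≤ 2 * min a b := by omega
          simp [hab, hgt, hz, hneg, h2]
        · have hrec := solveLoop_self (a - 2 * (a - b))
          have h2 : max a b ≤ 2 * min a b := by omega
          simp [hab, hgt, hz, hneg, ← h1, hrec, h2]
    · have h1 : a - (b - a) = b - 2 * (b - a) := by ring
      by_cases hz : a - (b - a) = 0
      · have h2 : max a b ≤ 2 * min a b := by omega
        simp [hab, hgt, hz, h2]
        omega
      · by_cases hneg : a - (b - a) ≤ 0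
        · have h2 : ¬ max a b ≤ 2 * min a b := by omega
          simp [hab, hgt, hz, hneg, h2]
        · have h2 : max a b ≤ 2 * min a b := by omega
          simp [hab, hgt, h2]
          refine Or.inr ⟨by omega, by omega, ?_⟩; rw [h1]; exact solveLoop_self _

theorem mod3_eq (n : Int) : PySem.Int.mod n 3 = n % 3 :=
  PySem.Int.mod_eq_emod_of_pos (by norm_num)

theorem solve_spec : Claim_unchanged_solve := by
  intro a b _ hD
  unfold solve solve_alt
  simp only [mod3_eq]
  by_cases hm : (a + b) % 3 = 0
  · simp only [hm]
    rw [solveLoop_eq]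
    by_cases hab : a = b
    · subst hab
      have h3 : a % 3 = 0 := by omega
      have ha : 0 ≤ a := by
        by_contra hneg
        exact hD ⟨rfl, by omega, h3⟩
      simp
      omega
    · simp [hab]
  · simp [hm]

theorem solve_changed : Claim_changed_solve := by
  unfold Claim_changed_solve
  refine ⟨by decide, by decide, ?_, ?_, by decide⟩
  · show solve (-3) (-3) = true
    unfold solve
    simp [solveLoop_self]
  · show solve_alt (-3) (-3) = false
    unfold solve_alt
    decide

theorem solve_tight : Claim_exact_solve := by
  intro a b _ hD
  obtain ⟨hab, hneg, h3⟩ := hD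
  subst hab
  unfold solve solve_alt
  simp only [mod3_eq]
  have hm : (a + a) % 3 = 0 := by omega
  simp only [hm]
  rw [solveLoop_self]
  simp
  omega
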